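-- pv_equiv track=rewrite | github.com/Esensia/practice | programmers/멀리 뛰기.py | solution
-- ===== SOURCE A (Python) =====
-- def solution(n):
--     answer = 0
--
--     dp = [0 for i in range(n+1)]
--
--     if n >=3 :
--
--         dp[1] = 1
--         dp[2] = 2
--         dp[3] = 3
--
--         for i in range(3,n+1) :
--             dp[i] = dp[i-1] + dp[i-2]
--         answer = dp[n]%1234567
--     elif n==1 :
--         return 1
--     else :
--         return 2
--     return answer
-- ===== SOURCE B (Python) =====
-- MOD = 1234567
--
--
-- def _fib_pair(k):
--     # (F(k) mod MOD, F(k+1) mod MOD) by fast doubling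
--     if k == 0:
--         return (0, 1)
--     a, b = _fib_pair(k // 2)
--     c = a * (2 * b - a) % MOD
--     d = (a * a + b * b) % MOD
--     if k % 2 == 1:
--         return (d, (c + d) % MOD)
--     return (c, d)
--
--
-- def solution(n):
--     return _fib_pair(n + 1)[0]
-- ===== Notes on version B (the rewrite author's own statement) =====
-- stated objective: faster
-- what changed: Replaces the O(n) dp-array recurrence with fast-doubling Fibonacci computed modulo 1234567 (A only reduces mod at the end, so its big-integer dp entries grow linearly in bit size).
-- intended difference: For n = 0 A's else-branch falls through and returns 2, while B returns 1 = F(1) mod 1234567, the intended count (one empty jump sequence); A's 2 is an accident of its branch ordering. — e.g. on solution(0): A returns 2, B returns 1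
-- outside the precondition, e.g. on solution(-1): A returns 2, B returns 0; on solution(-2): A returns 2, B raises RecursionError
import Mathlib
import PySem

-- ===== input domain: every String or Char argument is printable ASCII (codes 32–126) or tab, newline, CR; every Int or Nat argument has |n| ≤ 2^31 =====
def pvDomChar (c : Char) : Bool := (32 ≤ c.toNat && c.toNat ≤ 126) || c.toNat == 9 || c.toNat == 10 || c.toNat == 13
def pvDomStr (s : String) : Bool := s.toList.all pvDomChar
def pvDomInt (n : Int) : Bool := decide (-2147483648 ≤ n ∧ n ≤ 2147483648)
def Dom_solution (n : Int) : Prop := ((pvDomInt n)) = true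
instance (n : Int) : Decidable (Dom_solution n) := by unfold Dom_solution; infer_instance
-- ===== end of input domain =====

-- B replaces A's O(n) dp-array recurrence (which reduces mod 1234567 only at the end)
-- by fast-doubling Fibonacci computed modulo 1234567 throughout (objective: faster).

-- ===== PORT A =====
def solution (n : Int) : Int :=
  let _answer : Int := 0
  let dp : List Int := (PySem.List.pyRange 0 (n + 1) 1).map (fun _ => 0)
  if 3 ≤ n then
    let dp := PySem.List.pySetD dp 1 1
    let dp := PySem.List.pySetD dp 2 2
    let dp := PySem.List.pySetD dp 3 3
    let dp := (PySem.List.pyRange 3 (n + 1) 1).foldl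
      (fun dp i =>
        PySem.List.pySetD dp i (PySem.List.pyGetD dp (i - 1) 0 + PySem.List.pyGetD dp (i - 2) 0)) dp
    PySem.Int.mod (PySem.List.pyGetD dp n 0) 1234567
  else if n = 1 then 1
  else 2

-- ===== PORT B =====
-- fast doubling: (F(k) mod 1234567, F(k+1) mod 1234567); the fuel argument is a totality
-- guard only (Source B's recursion halves k until it reaches 0).
def fibPair : Nat → Int → Int × Int
  | 0, _ => (0, 1)
  | fuel + 1, k =>
    if k = 0 then (0, 1)
    else
      let p := fibPair fuel (PySem.Int.floordiv k 2)
      let a := p.1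
      let b := p.2
      let c := PySem.Int.mod (a * (2 * b - a)) 1234567
      let d := PySem.Int.mod (a * a + b * b) 1234567
      if PySem.Int.mod k 2 = 1 then (d, PySem.Int.mod (c + d) 1234567)
      else (c, d)

def solution_alt (n : Int) : Int := (fibPair ((n + 1).toNat + 1) (n + 1)).1

-- ===== PRECONDITION & SPEC =====
-- Pre_ excludes negative n, outside the jump problem's domain: there A's else-branch
-- fallthrough returns 2 while B returns F(0)=0 (n = -1) or exceeds the recursion limit (n ≤ -2).
def Pre_solution (n : Int) : Prop := 0 ≤ n
instance (n : Int) : Decidable (Pre_solution n) := by unfold Pre_solution; infer_instance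
def pvWitness_solution : Int := 5

-- For n = 0 A's else-branch falls through and returns 2, while B returns 1 = F(1) mod 1234567,
-- the intended count (one empty jump sequence); A's 2 is an accident of its branch ordering.
def D_solution (n : Int) : Prop := n = 0
instance (n : Int) : Decidable (D_solution n) := by unfold D_solution; infer_instance

def Spec_solution (n : Int) (out : Int) : Prop := ¬ D_solution n → out = solution_alt n
instance (n : Int) (out : Int) : Decidable (Spec_solution n out) := by unfold Spec_solution; infer_instance

def pvDiffWitness_solution : Int := 0
def pvDiffWitnessOut_solution : Int × Int := (2, 1)

-- ===== CLAIM (what is proved, stated in full; the proofs are below) =====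
def Claim_unchanged_solution : Prop := ∀ (n : Int), Dom_solution n → Pre_solution n → Spec_solution n (solution n)
def Claim_changed_solution : Prop := Dom_solution (pvDiffWitness_solution) ∧ Pre_solution (pvDiffWitness_solution) ∧ D_solution (pvDiffWitness_solution) ∧ solution (pvDiffWitness_solution) = pvDiffWitnessOut_solution.1 ∧ solution_alt (pvDiffWitness_solution) = pvDiffWitnessOut_solution.2 ∧ pvDiffWitnessOut_solution.1 ≠ pvDiffWitnessOut_solution.2
def Claim_exact_solution : Prop := ∀ (n : Int), Dom_solution n → Pre_solution n → D_solution n → solution n ≠ solution_alt n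

-- ===== LEMMAS AND PROOFS =====

theorem fibPair_spec : ∀ (fuel k : Nat), k < fuel →
    fibPair fuel (k : Int) = ((Nat.fib k : Int) % 1234567, (Nat.fib (k + 1) : Int) % 1234567) := by
  intro fuel
  induction fuel with
  | zero => intro k hk; omega
  | succ f ih =>
    intro k hk
    by_cases hk0 : k = 0
    · subst hk0; simp [fibPair]
    · have hkpos : 0 < k := Nat.pos_of_ne_zero hk0
      have hdiv : PySem.Int.floordiv (k : Int) 2 = ((k / 2 : Nat) : Int) := by
        exact_mod_cast PySem.Int.floordiv_natCast k 2
      have hmod : PySem.Int.mod (k : Int) 2 = ((k % 2 : Nat) : Int) := by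
        exact_mod_cast PySem.Int.mod_natCast k 2
      have hrec := ih (k / 2) (by omega)
      have hknz : (k : Int) ≠ 0 := by exact_mod_cast hk0
      set m := k / 2 with hm
      set F : Int := (Nat.fib m : Int) with hF
      set G : Int := (Nat.fib (m + 1) : Int) with hG
      have hMpos : (0:Int) < 1234567 := by norm_num
      -- cast identities for doubling
      have hfle : Nat.fib m ≤ 2 * Nat.fib (m + 1) := by
        have := Nat.fib_le_fib_succ (n := m); omega
      have h2m : (Nat.fib (2 * m) : Int) = F * (2 * G - F) := by
        rw [Nat.fib_two_mul]
        push_cast [hfle]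
        ring
      have h2m1 : (Nat.fib (2 * m + 1) : Int) = F * F + G * G := by
        rw [Nat.fib_two_mul_add_one]
        push_cast
        ring
      have hFM : Int.ModEq 1234567 (F % 1234567) F := Int.emod_emod_of_dvd _ dvd_rfl
      have hGM : Int.ModEq 1234567 (G % 1234567) G := Int.emod_emod_of_dvd _ dvd_rfl
      have hc : PySem.Int.mod ((F % 1234567) * (2 * (G % 1234567) - F % 1234567)) 1234567
          = (Nat.fib (2 * m) : Int) % 1234567 := by
        rw [PySem.Int.mod_eq_emod_of_pos hMpos, h2m]
        exact hFM.mul ((Int.ModEq.mul_left 2 hGM).sub hFM)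
      have hd : PySem.Int.mod ((F % 1234567) * (F % 1234567) + (G % 1234567) * (G % 1234567)) 1234567
          = (Nat.fib (2 * m + 1) : Int) % 1234567 := by
        rw [PySem.Int.mod_eq_emod_of_pos hMpos, h2m1]
        exact (hFM.mul hFM).add (hGM.mul hGM)
      show fibPair (f + 1) (k : Int) = _
      rw [fibPair, if_neg hknz]
      simp only [hdiv, hrec, hmod]
      by_cases hpar : k % 2 = 1
      · have hk2 : k = 2 * m + 1 := by omega
        rw [if_pos (show ((k % 2 : Nat) : Int) = 1 by exact_mod_cast hpar), hc, hd, hk2]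
        have hsum : PySem.Int.mod ((Nat.fib (2 * m) : Int) % 1234567 + (Nat.fib (2 * m + 1) : Int) % 1234567) 1234567
            = (Nat.fib (2 * m + 1 + 1) : Int) % 1234567 := by
          rw [PySem.Int.mod_eq_emod_of_pos hMpos]
          have hstep : (Nat.fib (2 * m + 1 + 1) : Int) = (Nat.fib (2 * m) : Int) + (Nat.fib (2 * m + 1) : Int) := by
            rw [Nat.fib_add_two]; push_cast; ring
          rw [hstep]
          exact Int.ModEq.add (Int.emod_emod_of_dvd _ dvd_rfl) (Int.emod_emod_of_dvd _ dvd_rfl)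
        rw [hsum]
      · have hk2 : k = 2 * m := by omega
        rw [if_neg (show ¬((k % 2 : Nat) : Int) = 1 by exact_mod_cast hpar), hc, hd, hk2]

def dpInit (N : Nat) : List Int :=
  (((List.replicate (N + 1) (0 : Int)).set 1 1).set 2 2).set 3 3

def dpStep (dp : List Int) (i : Int) : List Int :=
  PySem.List.pySetD dp i (PySem.List.pyGetD dp (i - 1) 0 + PySem.List.pyGetD dp (i - 2) 0)

theorem loop_inv (N : Nat) (hN : 3 ≤ N) : ∀ (b : Nat), 3 ≤ b → b ≤ N + 1 →
    ((PySem.List.pyRange 3 (b : Int) 1).foldl dpStep (dpInit N)).length = N + 1 ∧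
    ∀ j : Nat, 1 ≤ j → j < b →
      ((PySem.List.pyRange 3 (b : Int) 1).foldl dpStep (dpInit N)).getD j 0 = (Nat.fib (j + 1) : Int) := by
  intro b
  induction b with
  | zero => omega
  | succ b ih =>
    intro hb3 hbN
    by_cases hb : b < 3
    · -- b + 1 = 3 : empty range, initial list
      have hb3' : b = 2 := by omega
      subst hb3'
      have hnil : PySem.List.pyRange 3 ((3:Nat) : Int) 1 = [] := PySem.List.pyRange_one_eq_nil (by norm_num)
      constructor
      · show ((PySem.List.pyRange 3 ((2+1:Nat) : Int) 1).foldl dpStep (dpInit N)).length = N + 1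
        norm_num [hnil, dpInit]
      · intro j hj1 hj3
        interval_cases j
        · show ((PySem.List.pyRange 3 ((2+1:Nat) : Int) 1).foldl dpStep (dpInit N)).getD 1 0 = _
          norm_num [hnil, dpInit]
          rw [List.getElem?_set_self (by simp; omega)]
          norm_num [Nat.fib]
        · show ((PySem.List.pyRange 3 ((2+1:Nat) : Int) 1).foldl dpStep (dpInit N)).getD 2 0 = _
          norm_num [hnil, dpInit]
          rw [List.getElem?_set_self (by simp; omega)]
          norm_num [Nat.fib]
    · have hb3'' : 3 ≤ b := by omega
      obtain ⟨ihlen, ihval⟩ := ih hb3'' (by omega)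
      set L := (PySem.List.pyRange 3 (b : Int) 1).foldl dpStep (dpInit N) with hL
      have hsplit : PySem.List.pyRange 3 ((b + 1 : Nat) : Int) 1
          = PySem.List.pyRange 3 (b : Int) 1 ++ [(b : Int)] := by
        rw [show ((b + 1 : Nat) : Int) = (b : Int) + 1 by push_cast; ring]
        exact PySem.List.pyRange_one_succ_right (by exact_mod_cast hb3'')
      have hfold : (PySem.List.pyRange 3 ((b + 1 : Nat) : Int) 1).foldl dpStep (dpInit N)
          = dpStep L ((b : Int)) := by
        rw [hsplit, List.foldl_append]
        rfl
      have hm1 : ((b : Int) - 1) = ((b - 1 : Nat) : Int) := by omega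
      have hm2 : ((b : Int) - 2) = ((b - 2 : Nat) : Int) := by omega
      have hv : dpStep L ((b : Int)) = L.set b ((Nat.fib b : Int) + (Nat.fib (b - 1) : Int)) := by
        unfold dpStep
        rw [hm1, hm2]
        rw [PySem.List.pyGetD_natCast, PySem.List.pyGetD_natCast, PySem.List.pySetD_natCast]
        rw [ihval (b - 1) (by omega) (by omega), ihval (b - 2) (by omega) (by omega)]
        rw [show b - 1 + 1 = b by omega, show b - 2 + 1 = b - 1 by omega]
      have hlen : (L.set b ((Nat.fib b : Int) + (Nat.fib (b - 1) : Int))).length = N + 1 := by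
        rw [List.length_set]; exact ihlen
      refine ⟨by rw [hfold, hv]; exact hlen, ?_⟩
      intro j hj1 hjb
      rw [hfold, hv]
      rw [List.getD_eq_getElem _ _ (by rw [hlen]; omega)]
      rw [List.getElem_set]
      by_cases hjb' : b = j
      · subst hjb'
        rw [if_pos rfl]
        have hfib : Nat.fib (b + 1) = Nat.fib (b - 1) + Nat.fib b := by
          have h := Nat.fib_add_two (n := b - 1)
          rw [show b - 1 + 2 = b + 1 by omega, show b - 1 + 1 = b by omega] at h
          exact h
        rw [hfib]; push_cast; ring
      · rw [if_neg hjb']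
        rw [← List.getD_eq_getElem _ _ (by rw [ihlen]; omega)]
        exact ihval j hj1 (by omega)

theorem solution_alt_fib (n : Int) (h : 0 ≤ n) :
    solution_alt n = (Nat.fib ((n + 1).toNat) : Int) % 1234567 := by
  unfold solution_alt
  rw [show (n + 1) = (((n + 1).toNat : Nat) : Int) by omega, Int.toNat_natCast]
  rw [fibPair_spec ((n + 1).toNat + 1) ((n + 1).toNat) (by omega)]

theorem solution_fib (n : Int) (h : 3 ≤ n) :
    solution n = (Nat.fib ((n + 1).toNat) : Int) % 1234567 := by
  unfold solution
  rw [if_pos h]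
  have hNc : (n + 1) = (((n.toNat + 1 : Nat)) : Int) := by omega
  set N := n.toNat with hNdef
  have hN3 : 3 ≤ N := by omega
  -- the initial list is replicate (N+1) 0
  have hinit : (PySem.List.pyRange 0 (n + 1) 1).map (fun _ => (0 : Int)) = List.replicate (N + 1) 0 := by
    rw [List.map_const', PySem.List.length_pyRange_one]
    congr 1
    omega
  -- the three assignments produce dpInit N
  have hsets : PySem.List.pySetD (PySem.List.pySetD (PySem.List.pySetD (List.replicate (N + 1) (0:Int)) 1 1) 2 2) 3 3
      = dpInit N := by
    simp [PySem.List.pySetD_of_nonneg, dpInit]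
  simp only [hinit, hsets]
  have hlam : (fun dp i =>
      PySem.List.pySetD dp i (PySem.List.pyGetD dp (i - 1) 0 + PySem.List.pyGetD dp (i - 2) 0)) = dpStep := rfl
  rw [hlam, hNc]
  obtain ⟨hlen, hval⟩ := loop_inv N hN3 (N + 1) (by omega) (le_refl _)
  rw [show n = ((N : Nat) : Int) by omega, PySem.List.pyGetD_natCast]
  rw [hval N (by omega) (by omega)]
  rw [PySem.Int.mod_eq_emod_of_pos (by norm_num)]
  simp

theorem final (n : Int) (h1 : 1 ≤ n) : solution n = solution_alt n := by
  by_cases h3 : 3 ≤ n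
  · rw [solution_fib n h3, solution_alt_fib n (by omega)]
  · interval_cases n
    · decide
    · decide


-- ===== VERDICT (by name: the statement is the Claim_ definition above) =====
theorem solution_spec : Claim_unchanged_solution := by
  intro n _ hpre hnD
  have h1 : 1 ≤ n := by
    unfold Pre_solution at hpre
    unfold D_solution at hnD
    omega
  exact final n h1

theorem solution_changed : Claim_changed_solution := by unfold Claim_changed_solution; decide

theorem solution_tight : Claim_exact_solution := by
  intro n _ _ hD
  unfold D_solution at hD
  subst hD
  decide
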